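-- pv_equiv track=rewrite | github.com/JLBBARCO/total-score | lib/pointAnswers/__init__.py | decode_alternatives
-- ===== SOURCE A (Python) =====
-- def decode_alternatives(value):
--     """Decompõe um número em potências de 2 (1, 2, 4, 8, 16, 32, 64, 128, 256, 512)"""
--     alternatives = list()
--     while value > 0:
--         if value >= 512:
--             value -= 512
--             alternatives.append(512)
--         elif value >= 256:
--             value -= 256
--             alternatives.append(256)
--         elif value >= 128:
--             value -= 128
--             alternatives.append(128)
--         elif value >= 64:
--             value -= 64
--             alternatives.append(64)
--         elif value >= 32:
--             value -= 32
--             alternatives.append(32)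
--         elif value >= 16:
--             value -= 16
--             alternatives.append(16)
--         elif value >= 8:
--             value -= 8
--             alternatives.append(8)
--         elif value >= 4:
--             value -= 4
--             alternatives.append(4)
--         elif value >= 2:
--             value -= 2
--             alternatives.append(2)
--         elif value >= 1:
--             value -= 1
--             alternatives.append(1)
--         else:
--             break
--     return alternatives
-- ===== SOURCE B (Python) =====
-- def decode_alternatives(value):
--     """Decompõe um número em potências de 2 (1, 2, 4, 8, 16, 32, 64, 128, 256, 512)"""
--     alternatives = []
--     if value > 0:
--         q, r = divmod(value, 512)
--         alternatives = [512] * q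
--         bit = 256
--         while bit >= 1:
--             if r >= bit:
--                 r -= bit
--                 alternatives.append(bit)
--             bit //= 2
--     return alternatives
-- ===== Notes on version B (the rewrite author's own statement) =====
-- stated objective: alternative
-- what changed: Replaces the one-power-per-iteration subtraction loop by a single divmod producing all top-power copies at once plus a fixed 9-step binary-digit scan of the remainder.
import Mathlib
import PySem

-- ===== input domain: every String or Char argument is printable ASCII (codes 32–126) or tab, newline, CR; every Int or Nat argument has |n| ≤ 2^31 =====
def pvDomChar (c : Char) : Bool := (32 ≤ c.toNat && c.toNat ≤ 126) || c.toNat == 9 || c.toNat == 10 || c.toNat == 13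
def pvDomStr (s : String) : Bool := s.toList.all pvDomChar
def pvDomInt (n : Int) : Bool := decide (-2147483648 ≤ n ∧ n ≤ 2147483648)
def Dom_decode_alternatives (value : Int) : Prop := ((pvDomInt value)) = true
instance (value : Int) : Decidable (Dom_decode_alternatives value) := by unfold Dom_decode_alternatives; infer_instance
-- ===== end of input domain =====

set_option maxHeartbeats 1000000


-- B replaces A's one-power-per-iteration subtraction loop by divmod(value,512) + a 9-step binary scan of the remainder.

-- ===== PORT A =====
def decode_alternatives (value : Int) : List Int :=
  if value > 0 then
    if value ≥ 512 then 512 :: decode_alternatives (value - 512)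
    else if value ≥ 256 then 256 :: decode_alternatives (value - 256)
    else if value ≥ 128 then 128 :: decode_alternatives (value - 128)
    else if value ≥ 64 then 64 :: decode_alternatives (value - 64)
    else if value ≥ 32 then 32 :: decode_alternatives (value - 32)
    else if value ≥ 16 then 16 :: decode_alternatives (value - 16)
    else if value ≥ 8 then 8 :: decode_alternatives (value - 8)
    else if value ≥ 4 then 4 :: decode_alternatives (value - 4)
    else if value ≥ 2 then 2 :: decode_alternatives (value - 2)
    else if value ≥ 1 then 1 :: decode_alternatives (value - 1)
    else []
  else []
termination_by value.toNat
decreasing_by all_goals omega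

-- ===== PORT B =====
-- the `while bit >= 1:` loop of Source B
def pvBitLoop (bit r : Int) : List Int :=
  if bit ≥ 1 then
    if r ≥ bit then bit :: pvBitLoop (PySem.Int.floordiv bit 2) (r - bit)
    else pvBitLoop (PySem.Int.floordiv bit 2) r
  else []
termination_by bit.toNat
decreasing_by all_goals (rw [PySem.Int.floordiv_eq_ediv_of_pos (by omega)]; omega)

def decode_alternatives_alt (value : Int) : List Int :=
  if value > 0 then
    List.replicate (PySem.Int.floordiv value 512).toNat 512
      ++ pvBitLoop 256 (PySem.Int.mod value 512)
  else []

-- ===== PRECONDITION & SPEC =====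
def Spec_decode_alternatives (value : Int) (out : List Int) : Prop := out = decode_alternatives_alt value
instance (value : Int) (out : List Int) : Decidable (Spec_decode_alternatives value out) := by unfold Spec_decode_alternatives; infer_instance

-- ===== CLAIM (what is proved, stated in full; the proofs are below) =====
def Claim_equal_decode_alternatives : Prop := ∀ (value : Int), Dom_decode_alternatives value → Spec_decode_alternatives value (decode_alternatives value)

-- ===== LEMMAS AND PROOFS =====

-- A on 0 ≤ r < 2·2^k equals B's bit loop started at bit = 2^k (k ≤ 8)
theorem pv_key (k : Nat) (hk : k ≤ 8) (r : Int) (h0 : 0 ≤ r) (h2 : r < 2 * 2 ^ k) :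
    decode_alternatives r = pvBitLoop ((2:Int) ^ k) r := by
  match k with
  | 0 =>
    have hd0 : decode_alternatives 0 = [] := by
      rw [decode_alternatives.eq_def]; norm_num
    have hb0 : pvBitLoop 0 0 = [] := by rw [pvBitLoop.eq_def]; norm_num
    have hhalf : PySem.Int.floordiv (1:Int) 2 = 0 := by
      rw [PySem.Int.floordiv_eq_ediv_of_pos (by omega)]; decide
    have : r = 0 ∨ r = 1 := by omega
    rcases this with h | h <;> subst h
    · rw [pvBitLoop.eq_def]
      norm_num [hhalf, hb0, hd0]
    · rw [decode_alternatives.eq_def, pvBitLoop.eq_def]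
      norm_num [hhalf, hb0, hd0]
  | k + 1 =>
    have hpow : (1:Int) ≤ 2 ^ (k + 1) := by
      have := pow_pos (by norm_num : (0:Int) < 2) (k + 1); omega
    have hhalf : PySem.Int.floordiv ((2:Int) ^ (k + 1)) 2 = (2:Int) ^ k := by
      rw [PySem.Int.floordiv_eq_ediv_of_pos (by omega), pow_succ]
      exact Int.mul_ediv_cancel _ (by omega)
    by_cases hr : r ≥ (2:Int) ^ (k + 1)
    · -- A takes exactly the power 2^(k+1) here
      have hA : decode_alternatives r = (2:Int) ^ (k + 1) :: decode_alternatives (r - 2 ^ (k + 1)) := by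
        have hk7 : k ≤ 7 := by omega
        interval_cases k <;>
          · norm_num at hr h2
            rw [decode_alternatives.eq_def]
            split_ifs <;> first | (exfalso; omega) | norm_num
      rw [hA, pvBitLoop.eq_def]
      rw [if_pos (by omega), if_pos (by omega), hhalf]
      rw [pv_key k (by omega) (r - 2 ^ (k + 1)) (by omega)
            (by simp only [pow_succ] at h2 hr ⊢; linarith)]
    · rw [pvBitLoop.eq_def]
      rw [if_pos (by omega), if_neg (by omega), hhalf]
      exact pv_key k (by omega) r h0 (by simp only [pow_succ] at hr ⊢; linarith)

theorem pvBitLoop_nonpos (bit r : Int) (h : r ≤ 0) : pvBitLoop bit r = [] := by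
  rw [pvBitLoop.eq_def]
  split_ifs with h1 h2
  · omega
  · exact pvBitLoop_nonpos _ r h
  · rfl
termination_by bit.toNat
decreasing_by rw [PySem.Int.floordiv_eq_ediv_of_pos (by omega)]; omega

theorem pv_main (v : Int) : decode_alternatives v = decode_alternatives_alt v := by
  by_cases hp : v > 0
  · by_cases h5 : v ≥ 512
    · have hrec := pv_main (v - 512)
      rw [decode_alternatives.eq_def]
      rw [if_pos hp, if_pos h5]
      rw [hrec]
      unfold decode_alternatives_alt
      by_cases h0 : v - 512 > 0
      · rw [if_pos h0, if_pos hp]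
        rw [PySem.Int.floordiv_eq_ediv_of_pos (by omega), PySem.Int.floordiv_eq_ediv_of_pos (by omega),
            PySem.Int.mod_eq_emod_of_pos (by omega), PySem.Int.mod_eq_emod_of_pos (by omega)]
        have hm : (v - 512) % 512 = v % 512 := by omega
        have hd : (v / 512).toNat = ((v - 512) / 512).toNat + 1 := by omega
        rw [hm, hd, List.replicate_succ, List.cons_append]
      · -- v = 512 exactly: the recursive side is empty
        have hv : v = 512 := by omega
        subst hv
        rw [if_neg h0, if_pos hp]
        rw [PySem.Int.floordiv_eq_ediv_of_pos (by omega), PySem.Int.mod_eq_emod_of_pos (by omega)]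
        norm_num [pvBitLoop_nonpos]
    · -- 0 < v < 512 : quotient is 0, remainder is v, and A equals the bit loop from 256
      unfold decode_alternatives_alt
      rw [if_pos hp, PySem.Int.floordiv_eq_ediv_of_pos (by omega),
          PySem.Int.mod_eq_emod_of_pos (by omega)]
      have hq : (v / 512).toNat = 0 := by omega
      have hm : v % 512 = v := by omega
      rw [hq, hm, List.replicate_zero, List.nil_append]
      have := pv_key 8 (le_refl 8) v (by omega) (by norm_num; omega)
      norm_num at this
      exact this
  · rw [decode_alternatives.eq_def]
    unfold decode_alternatives_alt
    simp [hp]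
termination_by v.toNat
decreasing_by omega

-- ===== VERDICT (by name: the statement is the Claim_ definition above) =====
theorem decode_alternatives_spec : Claim_equal_decode_alternatives := by
  intro value _
  exact pv_main value
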